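-- pv_equiv track=rewrite | github.com/commandblockguy/iopcc | 2024_punchcards/generate.py | gen_card
-- ===== SOURCE A (Python) =====
-- def punches(ebdic):
--   result = 0
--   num = ebdic & 0b1111
--   if num > 9:
--     num &= 0b111
--     result |= 1 << 10
--   if num:
--     result |= 1 << (num + 2)
--   zone = ((ebdic-1) >> 4) & 0b11
--   if zone < 3:
--     result |= 1 << zone
--   return result
--
-- def gen_card(data):
--   return '\n'.join(
--     [
--       '   +' + '-' * 81 + '+',
--       *('  ' + ('/' if i else '+') + ' ' + ''.join('@' if (punches(c) >> i) & 1 else n for c in data.ljust(80).encode('cp500')) + ' \\' for i, n in enumerate('__O123456789')),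
--       '  +' + '-' * 82 + '+'
--     ]
--   )
-- ===== SOURCE B (Python) =====
-- def _column(b):
--     # 12 cells of one punchcard column, top (row "12") to bottom (row "9"),
--     # computed directly per cell instead of via a punch bitmask
--     num = b & 15
--     eleven = num > 9
--     if eleven:
--         num &= 7
--     zone = ((b - 1) >> 4) & 3
--     col = []
--     for i, n in enumerate('__O123456789'):
--         punched = (i == zone and zone < 3) or (i == 10 and eleven) or (num != 0 and i == num + 2)
--         col.append('@' if punched else n)
--     return col
--
-- def gen_card(data):
--     cols = [_column(b) for b in data.ljust(80).encode('cp500')]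
--     body = [''.join(col[i] for col in cols) for i in range(12)]
--     lines = ['   +' + '-' * 81 + '+']
--     for i, row in enumerate(body):
--         lines.append('  ' + ('/' if i else '+') + ' ' + row + ' \\')
--     lines.append('  +' + '-' * 82 + '+')
--     return '\n'.join(lines)
-- ===== Notes on version B (the rewrite author's own statement) =====
-- stated objective: alternative
-- what changed: B builds the card character-major: it analyses each byte's punches once to produce its 12-cell column (deciding each cell with direct boolean tests instead of assembling and re-probing A's punch bitmask 12 times per byte) and then transposes the columns into the 12 body rows, instead of A's row-major generator that re-encodes data and re-calls punches(c) for every (row, byte) pair.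
import Mathlib
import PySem

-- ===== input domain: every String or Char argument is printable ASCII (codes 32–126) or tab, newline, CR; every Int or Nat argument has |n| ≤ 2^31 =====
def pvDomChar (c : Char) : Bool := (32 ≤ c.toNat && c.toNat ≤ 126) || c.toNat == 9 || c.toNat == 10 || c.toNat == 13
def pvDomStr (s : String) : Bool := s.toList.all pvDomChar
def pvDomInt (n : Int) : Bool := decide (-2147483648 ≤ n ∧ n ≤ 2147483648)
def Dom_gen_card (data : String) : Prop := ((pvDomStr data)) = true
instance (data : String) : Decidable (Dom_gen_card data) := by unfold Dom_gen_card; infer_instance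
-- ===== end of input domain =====

-- B builds the card character-major (one punch column per byte, each cell decided by direct
-- boolean tests, then transposed into the 12 body rows) instead of A's row-major generator
-- that rebuilds A's punch bitmask for every (row, byte) pair; alternative decomposition.

-- shared by both ports: the label string '__O123456789' as a char list
def labels : List Char := ['_', '_', 'O', '1', '2', '3', '4', '5', '6', '7', '8', '9']

-- cp500 (EBCDIC) byte of each Unicode code point 0..127 (covers every char of the domain); exact table
def cp500tbl : List Int := [0, 1, 2, 3, 55, 45, 46, 47, 22, 5, 37, 11, 12, 13, 14, 15, 16, 17, 18, 19, 60, 61, 50, 38, 24, 25, 63, 39, 28, 29, 30, 31, 64, 79, 127, 123, 91, 108, 80, 125, 77, 93, 92, 78, 107, 96, 75, 97, 240, 241, 242, 243, 244, 245, 246, 247, 248, 249, 122, 94, 76, 126, 110, 111, 124, 193, 194, 195, 196, 197, 198, 199, 200, 201, 209, 210, 211, 212, 213, 214, 215, 216, 217, 226, 227, 228, 229, 230, 231, 232, 233, 74, 224, 90, 95, 109, 121, 129, 130, 131, 132, 133, 134, 135, 136, 137, 145, 146, 147, 148, 149, 150, 151, 152, 153, 162, 163, 164, 165, 166, 167, 168,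 169, 192, 187, 208, 161, 7]

def cp500 (c : Char) : Int := cp500tbl.getD c.toNat 0

-- data.ljust(80).encode('cp500'), an identical subexpression of both Pythons
def ljustEnc (data : String) : List Int :=
  (data.toList ++ List.replicate (80 - data.toList.length) ' ').map cp500

-- ===== PORT A =====
def punches (ebdic : Int) : Int :=
  let result : Int := 0
  let num : Int := PySem.Int.band ebdic 15
  -- 'if num > 9: num &= 7; result |= 1 << 10' (the condition reads num before it is reassigned)
  let result := if num > 9 then PySem.Int.bor result ((1 : Int) <<< (10 : Int)) else result
  let num := if num > 9 then PySem.Int.band num 7 else num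
  let result := if num ≠ 0 then PySem.Int.bor result ((1 : Int) <<< (num + 2)) else result
  let zone := PySem.Int.band ((ebdic - 1) >>> (4 : Int)) 3
  if zone < 3 then PySem.Int.bor result ((1 : Int) <<< zone) else result

def gen_card (data : String) : String :=
  PySem.Str.join "\n" (
    ["   +" ++ String.mk (List.replicate 81 '-') ++ "+"]
    ++ (PySem.List.enumerate labels 0).map (fun p =>
        "  " ++ (if p.1 ≠ 0 then "/" else "+") ++ " " ++
        String.mk ((ljustEnc data).map (fun c =>
          if PySem.Int.band (punches c >>> p.1) 1 ≠ 0 then '@' else p.2)) ++ " \\")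
    ++ ["  +" ++ String.mk (List.replicate 82 '-') ++ "+"])

-- ===== PORT B =====
-- one punchcard column (12 cells, top to bottom) for one cp500 byte
def columnCells (b : Int) : List Char :=
  let num0 : Int := PySem.Int.band b 15
  let eleven : Bool := decide (num0 > 9)
  let num : Int := if eleven then PySem.Int.band num0 7 else num0
  let zone : Int := PySem.Int.band ((b - 1) >>> (4 : Int)) 3
  (PySem.List.enumerate labels 0).map (fun p =>
    if (p.1 = zone ∧ zone < 3) ∨ (p.1 = 10 ∧ eleven = true) ∨ (num ≠ 0 ∧ p.1 = num + 2)
    then '@' else p.2)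

def bCols (data : String) : List (List Char) := (ljustEnc data).map columnCells

def bBody (data : String) : List String :=
  (PySem.List.pyRange 0 12 1).map (fun i =>
    String.mk ((bCols data).map (fun col => (PySem.List.pyGet? col i).getD ' ')))

def gen_card_alt (data : String) : String :=
  PySem.Str.join "\n" (
    ["   +" ++ String.mk (List.replicate 81 '-') ++ "+"]
    ++ (PySem.List.enumerate (bBody data) 0).map (fun p =>
        "  " ++ (if p.1 ≠ 0 then "/" else "+") ++ " " ++ p.2 ++ " \\")
    ++ ["  +" ++ String.mk (List.replicate 82 '-') ++ "+"])

-- ===== PRECONDITION & SPEC =====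
def Spec_gen_card (data : String) (out : String) : Prop := out = gen_card_alt data
instance (data : String) (out : String) : Decidable (Spec_gen_card data out) := by unfold Spec_gen_card; infer_instance

-- ===== CLAIM (what is proved, stated in full; the proofs are below) =====
def Claim_equal_gen_card : Prop := ∀ (data : String), Dom_gen_card data → Spec_gen_card data (gen_card data)

-- ===== LEMMAS AND PROOFS =====

-- A's 12 cells for one byte, in row order (what each of B's columns must equal)
def mirror (b : Int) : List Char :=
  (PySem.List.enumerate labels 0).map (fun p =>
    if PySem.Int.band (punches b >>> p.1) 1 ≠ 0 then '@' else p.2)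

set_option maxRecDepth 40000 in
lemma master : ∀ n : Nat, n < 128 → columnCells (cp500tbl.getD n 0) = mirror (cp500tbl.getD n 0) := by decide

lemma cp_form (c : Char) : ∃ n : Nat, n < 128 ∧ cp500 c = cp500tbl.getD n 0 := by
  by_cases h : c.toNat < 128
  · exact ⟨c.toNat, h, rfl⟩
  · refine ⟨0, by norm_num, ?_⟩
    unfold cp500
    rw [List.getD_eq_default _ _ (by simpa [show cp500tbl.length = 128 from by simp [cp500tbl]] using Nat.le_of_not_lt h)]
    decide

lemma colmirror (c : Char) : columnCells (cp500 c) = mirror (cp500 c) := by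
  obtain ⟨n, hn, he⟩ := cp_form c
  rw [he]; exact master n hn

lemma cellEq (c : Char) (i : Nat) (h : i < 12) :
    (PySem.List.pyGet? (columnCells (cp500 c)) (i : Int)).getD ' ' =
    (if PySem.Int.band (punches (cp500 c) >>> (i : Int)) 1 ≠ 0 then '@' else labels.getD i ' ') := by
  rw [colmirror]
  interval_cases i <;>
    simp [mirror, labels, PySem.List.pyGet?, PySem.List.pyIdx?]

lemma rowStr (data : String) (i : Nat) (h : i < 12) :
    ((bCols data).map (fun col => (PySem.List.pyGet? col (i : Int)).getD ' ')) =
    ((ljustEnc data).map (fun c =>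
      if PySem.Int.band (punches c >>> (i : Int)) 1 ≠ 0 then '@' else labels.getD i ' ')) := by
  unfold bCols ljustEnc
  rw [List.map_map, List.map_map, List.map_map]
  congr 1
  funext c
  simpa using cellEq c i h

lemma enumL : PySem.List.enumerate labels 0 =
    [(0,'_'),(1,'_'),(2,'O'),(3,'1'),(4,'2'),(5,'3'),(6,'4'),(7,'5'),(8,'6'),(9,'7'),(10,'8'),(11,'9')] := by decide

lemma pyR : PySem.List.pyRange 0 12 1 = [0,1,2,3,4,5,6,7,8,9,10,11] := by decide

-- ===== VERDICT (by name: the statement is the Claim_ definition above) =====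
theorem gen_card_spec : Claim_equal_gen_card := by
  intro data _
  unfold Spec_gen_card gen_card gen_card_alt
  apply congrArg (PySem.Str.join "\n")
  have hb : bBody data = [0,1,2,3,4,5,6,7,8,9,10,11].map (fun i =>
      String.mk ((bCols data).map (fun col => (PySem.List.pyGet? col i).getD ' '))) := by
    unfold bBody; rw [pyR]
  rw [enumL, hb]
  simp only [List.map_cons, List.map_nil, PySem.List.enumerate_cons, PySem.List.enumerate_nil,
    List.cons_append, List.nil_append, List.cons.injEq, and_true]
  norm_num
  refine ⟨?_, ?_, ?_, ?_, ?_, ?_, ?_, ?_, ?_, ?_, ?_, ?_⟩ <;>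
    first
      | · apply congrArg String.mk
          simpa using (rowStr data 0 (by norm_num)).symm
      | · apply congrArg String.mk
          simpa using (rowStr data 1 (by norm_num)).symm
      | · apply congrArg String.mk
          simpa using (rowStr data 2 (by norm_num)).symm
      | · apply congrArg String.mk
          simpa using (rowStr data 3 (by norm_num)).symm
      | · apply congrArg String.mk
          simpa using (rowStr data 4 (by norm_num)).symm
      | · apply congrArg String.mk
          simpa using (rowStr data 5 (by norm_num)).symm
      | · apply congrArg String.mk
          simpa using (rowStr data 6 (by norm_num)).symm
      | · apply congrArg String.mk
          simpa using (rowStr data 7 (by norm_num)).symm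
      | · apply congrArg String.mk
          simpa using (rowStr data 8 (by norm_num)).symm
      | · apply congrArg String.mk
          simpa using (rowStr data 9 (by norm_num)).symm
      | · apply congrArg String.mk
          simpa using (rowStr data 10 (by norm_num)).symm
      | · apply congrArg String.mk
          simpa using (rowStr data 11 (by norm_num)).symm
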